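-- pv_equiv track=rewrite | github.com/Arsen1302/Code-copy-detector | TestData/solutions/problem_914_1.py | solution_914_1
-- ===== SOURCE A (Python) =====
-- from typing import List
--
-- def solution_914_1(light: List[int]) -> int:
--     max = count = 0
--     for i in range(len(light)):
--         if max < light[i]:
--             max = light[i]
--         if max == i + 1:
--             count += 1
--     return count
-- ===== SOURCE B (Python) =====
-- from typing import List
--
-- def solution_914_1(light: List[int]) -> int:
--     n = len(light)
--     diff = [0] * (n + 1)
--     first_at = {}
--     for j, v in enumerate(light):
--         if 1 <= v <= n and v not in first_at:
--             first_at[v] = j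
--         if j <= v - 2:
--             diff[j] += 1
--             diff[min(v - 1, n)] -= 1
--     count = run = 0
--     for i in range(n):
--         run += diff[i]
--         if run == 0 and first_at.get(i + 1, n) <= i:
--             count += 1
--     return count
-- ===== Notes on version B (the rewrite author's own statement) =====
-- stated objective: alternative
-- what changed: A keeps a running maximum updated in one fused pass; B never computes a maximum: it records, per element, the interval of indices it 'blocks' (where it exceeds i+1) in a difference array plus the first occurrence of each candidate value in a dict, then a prefix-sum sweep counts indices with zero active blockers whose value i+1 has already occurred.
import Mathlib
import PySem

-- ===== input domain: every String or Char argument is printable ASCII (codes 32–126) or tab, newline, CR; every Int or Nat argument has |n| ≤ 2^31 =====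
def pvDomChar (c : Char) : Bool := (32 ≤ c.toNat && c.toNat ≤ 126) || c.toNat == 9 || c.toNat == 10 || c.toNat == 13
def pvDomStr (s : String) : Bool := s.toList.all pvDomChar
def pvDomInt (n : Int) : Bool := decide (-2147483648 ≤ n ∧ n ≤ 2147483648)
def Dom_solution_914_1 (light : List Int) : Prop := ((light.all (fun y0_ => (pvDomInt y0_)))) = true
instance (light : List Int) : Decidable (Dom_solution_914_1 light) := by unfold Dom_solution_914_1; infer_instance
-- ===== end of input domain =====

-- B replaces A's fused running-max pass by a difference-array interval sweep plus a first-occurrence dict (no maximum is ever computed); alternative algorithm, same O(n) cost.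


-- ===== PORT A =====
def solution_914_1 (light : List Int) : Int :=
  ((PySem.List.pyRange 0 light.length 1).foldl
    (fun (p : Int × Int) i =>
      let mx := if p.1 < PySem.List.pyGetD light i 0 then PySem.List.pyGetD light i 0 else p.1
      (mx, if mx == i + 1 then p.2 + 1 else p.2)) (0, 0)).2

-- ===== PORT B =====
-- body of B's first loop (diff/first_at construction), one step per (j, v) of enumerate(light)
def pvBuild (n : Int) (st : List Int × PySem.Dict Int Int) (jv : Int × Int) :
    List Int × PySem.Dict Int Int :=
  let j := jv.1
  let v := jv.2
  let fa := if 1 ≤ v ∧ v ≤ n ∧ st.2.contains v = false then st.2.insert v j else st.2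
  let d :=
    if j ≤ v - 2 then
      let d1 := PySem.List.pySetD st.1 j (PySem.List.pyGetD st.1 j 0 + 1)
      PySem.List.pySetD d1 (min (v - 1) n) (PySem.List.pyGetD d1 (min (v - 1) n) 0 - 1)
    else st.1
  (d, fa)

def solution_914_1_alt (light : List Int) : Int :=
  let n : Int := light.length
  let st := (PySem.List.enumerate light 0).foldl (pvBuild n)
    (List.replicate (n.toNat + 1) 0, PySem.Dict.empty)
  ((PySem.List.pyRange 0 n 1).foldl
    (fun (p : Int × Int) i =>
      let run := p.2 + PySem.List.pyGetD st.1 i 0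
      ((if run = 0 ∧ st.2.getD (i + 1) n ≤ i then p.1 + 1 else p.1), run)) (0, 0)).1

-- ===== PRECONDITION & SPEC =====
def Spec_solution_914_1 (light : List Int) (out : Int) : Prop := out = solution_914_1_alt light
instance (light : List Int) (out : Int) : Decidable (Spec_solution_914_1 light out) := by unfold Spec_solution_914_1; infer_instance

-- ===== CLAIM (what is proved, stated in full; the proofs are below) =====
def Claim_equal_solution_914_1 : Prop := ∀ (light : List Int), Dom_solution_914_1 light → Spec_solution_914_1 light (solution_914_1 light)

-- ===== LEMMAS AND PROOFS =====

-- ---- generic facts about foldl max ----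
theorem pv_foldl_max_mem (l : List Int) (a : Int) :
    l.foldl max a = a ∨ l.foldl max a ∈ l := by
  induction l generalizing a with
  | nil => simp
  | cons x xs ih =>
    rcases ih (max a x) with h | h
    · rw [List.foldl_cons, h]
      rcases max_choice a x with h2 | h2 <;> simp [h2]
    · simp [List.foldl_cons, h]

theorem pv_le_foldl_max (l : List Int) (a x : Int) (hx : x ∈ l ∨ x ≤ a) :
    x ≤ l.foldl max a := by
  induction l generalizing a with
  | nil =>
    rcases hx with hx | hx
    · simp at hx
    · simpa using hx
  | cons y ys ih =>
    rw [List.foldl_cons]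
    rcases hx with hx | hx
    · rcases List.mem_cons.mp hx with rfl | h
      · exact ih (max a x) (Or.inr (le_max_right a x))
      · exact ih (max a y) (Or.inl h)
    · exact ih (max a y) (Or.inr (le_trans hx (le_max_left a y)))

theorem pv_foldl_max_le (l : List Int) (a v : Int) (ha : a ≤ v) (h : ∀ x ∈ l, x ≤ v) :
    l.foldl max a ≤ v := by
  induction l generalizing a with
  | nil => simpa
  | cons x xs ih =>
    rw [List.foldl_cons]
    exact ih (max a x) (max_le ha (h x (List.mem_cons_self))) (fun y hy => h y (List.mem_cons_of_mem _ hy))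

theorem pv_max_char (l : List Int) (v : Int) (hv : 0 < v) :
    l.foldl max 0 = v ↔ (∀ x ∈ l, x ≤ v) ∧ v ∈ l := by
  constructor
  · intro h
    refine ⟨fun x hx => h ▸ pv_le_foldl_max l 0 x (Or.inl hx), ?_⟩
    rcases pv_foldl_max_mem l 0 with h0 | h0
    · omega
    · exact h ▸ h0
  · rintro ⟨hall, hmem⟩
    exact le_antisymm (pv_foldl_max_le l 0 v (le_of_lt hv) hall)
      (pv_le_foldl_max l 0 v (Or.inl hmem))

-- ---- A's loop computes (prefix max, count of good indices) ----
theorem pv_A_loop (light : List Int) (k : Nat) (hk : k ≤ light.length) :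
    (PySem.List.pyRange 0 (k : Int) 1).foldl
      (fun (p : Int × Int) i =>
        let mx := if p.1 < PySem.List.pyGetD light i 0 then PySem.List.pyGetD light i 0 else p.1
        (mx, if mx == i + 1 then p.2 + 1 else p.2)) (0, 0)
    = ((light.take k).foldl max 0,
       (((List.range k).countP
          (fun i => (light.take (i + 1)).foldl max 0 == (i : Int) + 1)) : Int)) := by
  induction k with
  | zero => simp [PySem.List.pyRange_one_eq_nil]
  | succ k ih =>
    have hk' : k ≤ light.length := Nat.le_of_succ_le hk
    have hklt : k < light.length := hk
    have hsplit : PySem.List.pyRange 0 ((k + 1 : Nat) : Int) 1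
        = PySem.List.pyRange 0 (k : Int) 1 ++ [(k : Int)] := by
      push_cast
      exact PySem.List.pyRange_one_succ_right (by positivity)
    have hget : PySem.List.pyGetD light (k : Int) 0 = light[k] := by
      rw [PySem.List.pyGetD_natCast, List.getD_eq_getElem light 0 hklt]
    have htake : light.take (k + 1) = light.take k ++ [light[k]] := by
      rw [List.take_add_one, List.getElem?_eq_getElem hklt]; rfl
    rw [hsplit, List.foldl_append, ih hk']
    simp only [List.foldl_cons, List.foldl_nil, hget]
    have hmx : (if (light.take k).foldl max 0 < light[k] then light[k]
        else (light.take k).foldl max 0) = (light.take (k + 1)).foldl max 0 := by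
      rw [htake, List.foldl_append]
      simp [max_def]
      omega
    rw [hmx]
    refine Prod.ext rfl ?_
    simp only [List.range_succ, List.countP_append, List.countP_cons, List.countP_nil]
    by_cases hc : ((light.take (k + 1)).foldl max 0 == (k : Int) + 1) = true
    · simp [hc]
    · simp [hc]

-- ---- sum of a take after an in-place add at one position ----
theorem pv_sum_take_set_add (d : List Int) (p m : Nat) (c : Int) (hp : p < d.length) :
    ((d.set p (d.getD p 0 + c)).take m).sum = (d.take m).sum + (if p < m then c else 0) := by
  induction d generalizing p m with
  | nil => simp at hp
  | cons x xs ih =>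
    cases p with
    | zero =>
      cases m with
      | zero => simp
      | succ m => simp [List.getD]; ring
    | succ p =>
      cases m with
      | zero => simp
      | succ m =>
        have := ih p m (by simpa using hp)
        simp only [List.set_cons_succ, List.take_succ_cons, List.sum_cons, List.getD_cons_succ,
          this, Nat.succ_lt_succ_iff]
        ring

-- ---- first-occurrence index: idxOf? over a snoc ----
theorem pv_idxOf?_append_singleton (l : List Int) (x w : Int) :
    (l ++ [x]).idxOf? w
      = ((l.idxOf? w).orElse (fun _ => if x = w then some l.length else none)) := by
  induction l with
  | nil =>
    simp only [List.nil_append, List.idxOf?_cons, List.idxOf?_nil, beq_iff_eq, List.length_nil]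
    split_ifs <;> simp [Option.orElse]
  | cons y l ih =>
    by_cases h : y = w
    · simp [List.idxOf?_cons, h, Option.orElse]
    · simp only [List.cons_append, List.idxOf?_cons, beq_iff_eq, if_neg h, ih, List.length_cons]
      cases hl : l.idxOf? w with
      | none =>
        simp only [Option.orElse, Option.map_none]
        split_ifs <;> simp
      | some k => simp [Option.orElse]

theorem pv_idxOf?_mem_take (l : List Int) (w : Int) (k m : Nat) (h : l.idxOf? w = some k) :
    w ∈ l.take m ↔ k < m := by
  induction l generalizing k m with
  | nil => simp [List.idxOf?] at h
  | cons y l ih =>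
    rw [List.idxOf?_cons] at h
    by_cases hy : y = w
    · simp only [beq_iff_eq, if_pos hy] at h
      cases h
      cases m with
      | zero => simp
      | succ m => simp [hy]
    · simp only [beq_iff_eq, if_neg hy] at h
      cases hk : l.idxOf? w with
      | none => simp [hk] at h
      | some k' =>
        rw [hk] at h
        simp only [Option.map_some] at h
        cases h
        cases m with
        | zero => simp
        | succ m =>
          simp only [List.take_succ_cons, List.mem_cons, Nat.succ_lt_succ_iff, ih k' m hk]
          constructor
          · rintro (rfl | h)
            · exact absurd rfl hy
            · exact h
          · exact Or.inr

theorem pv_idxOf?_none_not_mem (l : List Int) (w : Int) (h : l.idxOf? w = none) : w ∉ l :=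
  List.idxOf?_eq_none_iff.mp h

-- ---- the invariant of B's first loop ----
def pvInv (light : List Int) (t : Nat) (st : List Int × PySem.Dict Int Int) : Prop :=
  st.1.length = light.length + 1 ∧
  (∀ i : Nat, i < light.length →
    (st.1.take (i + 1)).sum
      = (((List.range t).countP
          (fun j => decide (j ≤ i ∧ (i : Int) + 1 < light.getD j 0))) : Int)) ∧
  (∀ w : Int, 1 ≤ w → w ≤ (light.length : Int) →
    st.2.get? w = Option.map (fun k : Nat => (k : Int)) ((light.take t).idxOf? w))

theorem pv_build_step (light : List Int) (t : Nat) (ht : t < light.length)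
    (st : List Int × PySem.Dict Int Int) (hinv : pvInv light t st) :
    pvInv light (t + 1) (pvBuild (light.length : Int) st ((t : Int), light[t])) := by
  obtain ⟨h1, h2, h3⟩ := hinv
  have htake : light.take (t + 1) = light.take t ++ [light[t]] := by
    rw [List.take_add_one, List.getElem?_eq_getElem ht]; rfl
  have hgdt : light.getD t 0 = light[t] := List.getD_eq_getElem light 0 ht
  refine ⟨?_, ?_, ?_⟩
  · -- length is preserved
    simp only [pvBuild]
    split_ifs <;> simp [PySem.List.length_pySetD, h1]
  · -- difference-array prefix sums
    intro i hi
    have hterm : (((List.range (t + 1)).countP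
          (fun j => decide (j ≤ i ∧ (i : Int) + 1 < light.getD j 0))) : Int)
        = (((List.range t).countP
          (fun j => decide (j ≤ i ∧ (i : Int) + 1 < light.getD j 0))) : Int)
          + (if (t ≤ i ∧ (i : Int) + 1 < light[t]) then 1 else 0) := by
      rw [List.range_succ, List.countP_append, List.countP_cons, List.countP_nil]
      rw [hgdt]
      by_cases h : (t ≤ i ∧ (i : Int) + 1 < light[t]) <;> simp [h]
    simp only [pvBuild]
    by_cases hc : (t : Int) ≤ light[t] - 2
    · rw [if_pos hc]
      have hq0 : (0 : Int) ≤ min (light[t] - 1) (light.length : Int) :=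
        le_min (by omega) (by positivity)
      have hqn : min (light[t] - 1) (light.length : Int) ≤ (light.length : Int) :=
        min_le_right _ _
      rw [PySem.List.pySetD_natCast, PySem.List.pyGetD_natCast,
        PySem.List.pySetD_of_nonneg _ _ hq0, PySem.List.pyGetD_of_nonneg _ _ hq0]
      have hset1 := pv_sum_take_set_add st.1 t (i + 1) 1 (by omega)
      have hlen1 : (st.1.set t (st.1.getD t 0 + 1)).length = light.length + 1 := by
        simp [h1]
      have hset2 := pv_sum_take_set_add (st.1.set t (st.1.getD t 0 + 1))
        ((min (light[t] - 1) (light.length : Int)).toNat) (i + 1) (-1)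
        (by rw [hlen1]; omega)
      have hval : (st.1.set t (st.1.getD t 0 + 1)).getD
            ((min (light[t] - 1) (light.length : Int)).toNat) 0 - 1
          = (st.1.set t (st.1.getD t 0 + 1)).getD
            ((min (light[t] - 1) (light.length : Int)).toNat) 0 + (-1) := sub_eq_add_neg _ _
      rw [hval, hset2, hset1, h2 i hi, hterm]
      have htoq : ((min (light[t] - 1) (light.length : Int)).toNat : Int)
          = min (light[t] - 1) (light.length : Int) := Int.toNat_of_nonneg hq0
      have hqcase := min_choice (light[t] - 1) (light.length : Int)
      have hle1 : min (light[t] - 1) (light.length : Int) ≤ light[t] - 1 := min_le_left _ _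
      split_ifs <;> omega
    · rw [if_neg hc]
      rw [h2 i hi, hterm, if_neg (by omega), add_zero]
  · -- first-occurrence dictionary
    intro w hw1 hw2
    rw [htake, pv_idxOf?_append_singleton]
    have hlt : (light.take t).length = t := by
      rw [List.length_take]; omega
    simp only [pvBuild]
    by_cases hcv : 1 ≤ light[t] ∧ light[t] ≤ (light.length : Int) ∧ st.2.contains light[t] = false
    · rw [if_pos hcv]
      by_cases hwv : w = light[t]
      · subst hwv
        have hnone : (light.take t).idxOf? light[t] = none := by
          have hsome : st.2.get? light[t] = none := by
            have hco := PySem.Dict.contains_eq_isSome_get? (d := st.2) (k := light[t])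
            rw [hcv.2.2] at hco
            exact Option.eq_none_iff_forall_ne_some.mpr
              (fun v hv => by rw [hv] at hco; simp at hco)
          have hmapeq := (h3 light[t] hw1 hw2).symm.trans hsome
          exact Option.map_eq_none_iff.mp hmapeq
        rw [PySem.Dict.get?_insert_self, hnone]
        simp [Option.orElse, hlt]
      · rw [PySem.Dict.get?_insert_of_ne _ _ hwv, h3 w hw1 hw2]
        cases hfind : (light.take t).idxOf? w with
        | none =>
          have hne : light[t] ≠ w := fun hh => hwv hh.symm
          simp [Option.orElse, hne]
        | some k => simp [Option.orElse]
    · rw [if_neg hcv]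
      rw [h3 w hw1 hw2]
      cases hfind : (light.take t).idxOf? w with
      | none =>
        by_cases hvw : light[t] = w
        · exfalso
          subst hvw
          have hcontains : st.2.contains light[t] = true := by
            rcases Bool.eq_false_or_eq_true (st.2.contains light[t]) with h | h
            · exact h
            · exact absurd ⟨hw1, hw2, h⟩ hcv
          have hsome := PySem.Dict.contains_eq_isSome_get? (d := st.2) (k := light[t])
          rw [hcontains] at hsome
          rw [h3 light[t] hw1 hw2, hfind] at hsome
          simp at hsome
        · simp [Option.orElse, hvw]
      | some k => simp [Option.orElse]

theorem pv_build_inv (light : List Int) (t : Nat) (ht : t ≤ light.length) :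
    pvInv light t
      ((PySem.List.enumerate (light.take t) 0).foldl (pvBuild (light.length : Int))
        (List.replicate (light.length + 1) 0, PySem.Dict.empty)) := by
  induction t with
  | zero =>
    refine ⟨by simp, ?_, ?_⟩
    · intro i hi
      simp [List.take_replicate]
    · intro w hw1 hw2
      simp [PySem.Dict.get?_empty]
  | succ t ih =>
    have ht' : t < light.length := ht
    have htake : light.take (t + 1) = light.take t ++ [light[t]] := by
      rw [List.take_add_one, List.getElem?_eq_getElem ht']; rfl
    have hlt : (light.take t).length = t := by
      rw [List.length_take]; omega
    rw [htake, PySem.List.enumerate_append, List.foldl_append]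
    have hsing : PySem.List.enumerate [light[t]] ((0 : Int) + (light.take t).length)
        = [((t : Int), light[t])] := by
      rw [PySem.List.enumerate_cons, PySem.List.enumerate_nil, hlt]
      norm_num
    rw [hsing]
    simp only [List.foldl_cons, List.foldl_nil]
    exact pv_build_step light t ht' _ (ih (le_of_lt ht'))

-- ---- B's second loop ----
theorem pv_count_loop (light : List Int) (diff : List Int) (fa : PySem.Dict Int Int)
    (hlen : diff.length = light.length + 1) (k : Nat) (hk : k ≤ light.length) :
    (PySem.List.pyRange 0 (k : Int) 1).foldl
      (fun (p : Int × Int) i =>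
        let run := p.2 + PySem.List.pyGetD diff i 0
        ((if run = 0 ∧ fa.getD (i + 1) (light.length : Int) ≤ i then p.1 + 1 else p.1), run))
      (0, 0)
    = ((((List.range k).countP
          (fun i => decide ((diff.take (i + 1)).sum = 0 ∧
            fa.getD ((i : Int) + 1) (light.length : Int) ≤ (i : Int)))) : Int),
       (diff.take k).sum) := by
  induction k with
  | zero => simp [PySem.List.pyRange_one_eq_nil]
  | succ k ih =>
    have hk' : k ≤ light.length := Nat.le_of_succ_le hk
    have hkd : k < diff.length := by omega
    have hsplit : PySem.List.pyRange 0 ((k + 1 : Nat) : Int) 1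
        = PySem.List.pyRange 0 (k : Int) 1 ++ [(k : Int)] := by
      push_cast
      exact PySem.List.pyRange_one_succ_right (by positivity)
    have hget : PySem.List.pyGetD diff (k : Int) 0 = diff[k] := by
      rw [PySem.List.pyGetD_natCast, List.getD_eq_getElem diff 0 hkd]
    have hrun : (diff.take k).sum + diff[k] = (diff.take (k + 1)).sum := by
      rw [List.take_add_one, List.getElem?_eq_getElem hkd]
      rw [Option.toList_some, List.sum_append, List.sum_cons, List.sum_nil, add_zero]
    rw [hsplit, List.foldl_append, ih hk']
    simp only [List.foldl_cons, List.foldl_nil, hget, hrun]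
    refine Prod.ext ?_ rfl
    simp only [List.range_succ, List.countP_append, List.countP_cons, List.countP_nil]
    by_cases hc : (diff.take (k + 1)).sum = 0 ∧
        fa.getD ((k : Int) + 1) (light.length : Int) ≤ (k : Int)
    · simp [hc]
    · simp [hc]

-- ---- the two per-index predicates agree ----
theorem pv_pred_eq (light : List Int) (st : List Int × PySem.Dict Int Int)
    (hinv : pvInv light light.length st) (i : Nat) (hi : i < light.length) :
    ((light.take (i + 1)).foldl max 0 == (i : Int) + 1)
      = decide ((st.1.take (i + 1)).sum = 0 ∧
          st.2.getD ((i : Int) + 1) (light.length : Int) ≤ (i : Int)) := by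
  obtain ⟨h1, h2, h3⟩ := hinv
  have hsum : (st.1.take (i + 1)).sum = 0 ↔ (∀ x ∈ light.take (i + 1), x ≤ (i : Int) + 1) := by
    rw [h2 i hi, Nat.cast_eq_zero, List.countP_eq_zero]
    constructor
    · intro h x hx
      obtain ⟨j, hj, hjx⟩ := List.mem_take_iff_getElem.mp hx
      have hjn : j < light.length := lt_of_lt_of_le hj (min_le_right _ _)
      have hji : j < i + 1 := lt_of_lt_of_le hj (min_le_left _ _)
      have := h j (List.mem_range.mpr hjn)
      simp only [decide_eq_true_eq, not_and, not_lt] at this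
      have hgd : light.getD j 0 = x := by rw [List.getD_eq_getElem light 0 hjn, hjx]
      rw [hgd] at this
      exact this (by omega)
    · intro h j hj
      simp only [decide_eq_true_eq, not_and, not_lt]
      intro hji
      have hjn : j < light.length := List.mem_range.mp hj
      have hmem : light[j] ∈ light.take (i + 1) :=
        List.mem_take_iff_getElem.mpr ⟨j, by omega, rfl⟩
      have := h _ hmem
      rw [List.getD_eq_getElem light 0 hjn]
      exact this
  have hfa : st.2.getD ((i : Int) + 1) (light.length : Int) ≤ (i : Int)
      ↔ ((i : Int) + 1) ∈ light.take (i + 1) := by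
    have h3' := h3 ((i : Int) + 1) (by omega) (by omega)
    rw [List.take_length] at h3'
    rw [PySem.Dict.getD_eq_get?_getD, h3']
    cases hfind : light.idxOf? ((i : Int) + 1) with
    | none =>
      simp only [Option.map_none, Option.getD_none]
      constructor
      · intro h
        exfalso
        omega
      · intro h
        exact absurd (List.mem_of_mem_take h) (pv_idxOf?_none_not_mem _ _ hfind)
    | some k =>
      simp only [Option.map_some, Option.getD_some]
      rw [pv_idxOf?_mem_take light _ k (i + 1) hfind]
      omega
  rw [Bool.eq_iff_iff]
  simp only [beq_iff_eq, decide_eq_true_eq]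
  rw [pv_max_char _ _ (by positivity), hsum, hfa]

theorem pv_main (light : List Int) : solution_914_1 light = solution_914_1_alt light := by
  have hA := pv_A_loop light light.length (le_refl _)
  have hinv := pv_build_inv light light.length (le_refl _)
  rw [List.take_length] at hinv
  unfold solution_914_1 solution_914_1_alt
  dsimp only
  rw [hA]
  rw [Int.toNat_natCast]
  set st := (PySem.List.enumerate light 0).foldl (pvBuild (light.length : Int))
    (List.replicate (light.length + 1) 0, PySem.Dict.empty) with hst
  rw [pv_count_loop light st.1 st.2 hinv.1 light.length (le_refl _)]
  dsimp only
  congr 1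
  exact List.countP_congr (fun i hi => by rw [pv_pred_eq light st hinv i (List.mem_range.mp hi)])

-- ===== VERDICT (by name: the statement is the Claim_ definition above) =====
theorem solution_914_1_spec : Claim_equal_solution_914_1 := by
  intro light _
  exact pv_main light
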